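-- pv_equiv track=rewrite | github.com/operator13/ai-augmented-e2e-testing | src/mcp/debug_helper.py | analyze_console_errors
-- ===== SOURCE A (Python) =====
-- from typing import Dict, List, Optional, Any, Tuple
--
-- def analyze_console_errors(
--
--     console_logs: List[Dict]
-- ) -> Dict[str, Any]:
--     """
--     Analyze console logs to identify potential issues.
--
--     Args:
--         console_logs: Console log entries
--
--     Returns:
--         Analysis results with categorized errors
--     """
--     analysis = {
--         'errors': [],
--         'warnings': [],
--         'network_issues': [],
--         'javascript_errors': [],
--         'recommendations': []
--     }
--
--     for log in console_logs:
--         log_type = log.get('type', '').lower()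
--         message = log.get('message', '')
--
--         if log_type == 'error':
--             analysis['errors'].append(message)
--
--             # Categorize errors
--             if 'network' in message.lower() or 'fetch' in message.lower():
--                 analysis['network_issues'].append(message)
--             elif 'script' in message.lower() or 'syntaxerror' in message.lower():
--                 analysis['javascript_errors'].append(message)
--
--         elif log_type == 'warning':
--             analysis['warnings'].append(message)
--
--     # Generate recommendations
--     if analysis['network_issues']:
--         analysis['recommendations'].append(
--             "Network errors detected - check API endpoints and connectivity"
--         )
--
--     if analysis['javascript_errors']:
--         analysis['recommendations'].append(
--             "JavaScript errors detected - may affect page functionality"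
--         )
--
--     if len(analysis['errors']) > 10:
--         analysis['recommendations'].append(
--             "High number of console errors - page may be unstable"
--         )
--
--     return analysis
-- ===== SOURCE B (Python) =====
-- def analyze_console_errors(console_logs):
--     def is_net(m):
--         ml = m.lower()
--         return 'network' in ml or 'fetch' in ml
--
--     def is_js(m):
--         ml = m.lower()
--         return 'script' in ml or 'syntaxerror' in ml
--
--     errors = [l.get('message', '') for l in console_logs
--               if l.get('type', '').lower() == 'error']
--     warnings = [l.get('message', '') for l in console_logs
--                 if l.get('type', '').lower() == 'warning']
--     network_issues = [m for m in errors if is_net(m)]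
--     javascript_errors = [m for m in errors if not is_net(m) and is_js(m)]
--
--     recommendations = (
--         (["Network errors detected - check API endpoints and connectivity"]
--          if network_issues else [])
--         + (["JavaScript errors detected - may affect page functionality"]
--            if javascript_errors else [])
--         + (["High number of console errors - page may be unstable"]
--            if len(errors) > 10 else [])
--     )
--     return {
--         'errors': errors,
--         'warnings': warnings,
--         'network_issues': network_issues,
--         'javascript_errors': javascript_errors,
--         'recommendations': recommendations,
--     }
-- ===== Notes on version B (the rewrite author's own statement) =====
-- stated objective: idiomatic
-- what changed: Replaces A's single fused loop mutating five accumulators with staged comprehensions: collect errors and warnings in separate passes, then re-filter the errors list for network issues and (non-network) javascript errors, and build recommendations as a concatenation of conditional singleton lists.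
import Mathlib
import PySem

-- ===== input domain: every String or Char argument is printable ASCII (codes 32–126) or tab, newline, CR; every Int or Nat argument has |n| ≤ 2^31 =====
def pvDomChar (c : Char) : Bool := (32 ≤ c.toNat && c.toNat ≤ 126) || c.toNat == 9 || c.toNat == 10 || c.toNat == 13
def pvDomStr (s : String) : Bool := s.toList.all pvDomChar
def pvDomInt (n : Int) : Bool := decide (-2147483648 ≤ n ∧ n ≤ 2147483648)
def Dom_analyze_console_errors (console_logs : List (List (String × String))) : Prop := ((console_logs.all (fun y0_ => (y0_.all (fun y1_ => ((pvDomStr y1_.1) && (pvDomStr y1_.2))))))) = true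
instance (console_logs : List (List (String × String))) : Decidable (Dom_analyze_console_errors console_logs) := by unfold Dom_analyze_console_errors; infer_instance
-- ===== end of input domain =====

-- B is the same O(n) work written idiomatically: staged comprehensions instead of one fused mutating loop.

-- shared dict-get helper: log.get(k, '') = first match in the association list, default ''
def pvGet (log : List (String × String)) (k : String) : String :=
  match log.find? (fun p => p.1 == k) with
  | some p => p.2
  | none => ""

-- ===== PORT A =====
-- one pass over the logs carrying (errors, warnings, network_issues, javascript_errors)
def pvStepA (st : List String × List String × List String × List String)
    (log : List (String × String)) : List String × List String × List String × List String :=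
  let (errs, warns, nets, js) := st
  let log_type := PySem.Str.lower (pvGet log "type")
  let message := pvGet log "message"
  if log_type == "error" then
    let errs := errs ++ [message]
    if PySem.Str.isIn "network" (PySem.Str.lower message)
        || PySem.Str.isIn "fetch" (PySem.Str.lower message) then
      (errs, warns, nets ++ [message], js)
    else if PySem.Str.isIn "script" (PySem.Str.lower message)
        || PySem.Str.isIn "syntaxerror" (PySem.Str.lower message) then
      (errs, warns, nets, js ++ [message])
    else
      (errs, warns, nets, js)
  else if log_type == "warning" then
    (errs, warns ++ [message], nets, js)
  else
    (errs, warns, nets, js)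

def analyze_console_errors (console_logs : List (List (String × String))) : List (String × List String) :=
  let st := console_logs.foldl pvStepA ([], [], [], [])
  let (errs, warns, nets, js) := st
  let recs : List String := []
  let recs := if nets ≠ [] then recs ++ ["Network errors detected - check API endpoints and connectivity"] else recs
  let recs := if js ≠ [] then recs ++ ["JavaScript errors detected - may affect page functionality"] else recs
  let recs := if PySem.List.len errs > 10 then recs ++ ["High number of console errors - page may be unstable"] else recs
  [("errors", errs), ("warnings", warns), ("network_issues", nets),
   ("javascript_errors", js), ("recommendations", recs)]

-- ===== PORT B =====
def pvIsNet (m : String) : Bool :=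
  let ml := PySem.Str.lower m
  PySem.Str.isIn "network" ml || PySem.Str.isIn "fetch" ml

def pvIsJs (m : String) : Bool :=
  let ml := PySem.Str.lower m
  PySem.Str.isIn "script" ml || PySem.Str.isIn "syntaxerror" ml

def analyze_console_errors_alt (console_logs : List (List (String × String))) : List (String × List String) :=
  let errors := (console_logs.filter
      (fun l => PySem.Str.lower (pvGet l "type") == "error")).map (fun l => pvGet l "message")
  let warnings := (console_logs.filter
      (fun l => PySem.Str.lower (pvGet l "type") == "warning")).map (fun l => pvGet l "message")
  let network_issues := errors.filter pvIsNet
  let javascript_errors := errors.filter (fun m => !pvIsNet m && pvIsJs m)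
  let recommendations :=
    (if network_issues ≠ [] then ["Network errors detected - check API endpoints and connectivity"] else [])
    ++ (if javascript_errors ≠ [] then ["JavaScript errors detected - may affect page functionality"] else [])
    ++ (if PySem.List.len errors > 10 then ["High number of console errors - page may be unstable"] else [])
  [("errors", errors), ("warnings", warnings), ("network_issues", network_issues),
   ("javascript_errors", javascript_errors), ("recommendations", recommendations)]

-- ===== PRECONDITION & SPEC =====
def Spec_analyze_console_errors (console_logs : List (List (String × String))) (out : List (String × List String)) : Prop := out = analyze_console_errors_alt console_logs
instance (console_logs : List (List (String × String))) (out : List (String × List String)) : Decidable (Spec_analyze_console_errors console_logs out) := by unfold Spec_analyze_console_errors; infer_instance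

-- ===== CLAIM (what is proved, stated in full; the proofs are below) =====
def Claim_equal_analyze_console_errors : Prop := ∀ (console_logs : List (List (String × String))), Dom_analyze_console_errors console_logs → Spec_analyze_console_errors console_logs (analyze_console_errors console_logs)

-- ===== LEMMAS AND PROOFS =====

-- A's fold appends, at each step, exactly what B's staged filters collect
lemma pvFoldA_eq (logs : List (List (String × String)))
    (e w n j : List String) :
    logs.foldl pvStepA (e, w, n, j) =
      (e ++ (logs.filter (fun l => PySem.Str.lower (pvGet l "type") == "error")).map (fun l => pvGet l "message"),
       w ++ (logs.filter (fun l => PySem.Str.lower (pvGet l "type") == "warning")).map (fun l => pvGet l "message"),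
       n ++ ((logs.filter (fun l => PySem.Str.lower (pvGet l "type") == "error")).map (fun l => pvGet l "message")).filter pvIsNet,
       j ++ ((logs.filter (fun l => PySem.Str.lower (pvGet l "type") == "error")).map (fun l => pvGet l "message")).filter (fun m => !pvIsNet m && pvIsJs m)) := by
  induction logs generalizing e w n j with
  | nil => simp
  | cons l ls ih =>
    simp only [List.foldl_cons, pvStepA]
    by_cases ht : PySem.Str.lower (pvGet l "type") == "error"
    · have ht' : PySem.Str.lower (pvGet l "type") = "error" := by simpa using ht
      by_cases hn : pvIsNet (pvGet l "message")
      · have hnC := hn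
        simp [pvIsNet] at hnC
        simp [ht', hn, hnC, ih]
      · have hnC := hn
        simp [pvIsNet] at hnC
        by_cases hs : pvIsJs (pvGet l "message")
        · have hsC := hs
          simp [pvIsJs] at hsC
          simp [ht', hn, hnC.1, hnC.2, hs, hsC, ih]
        · have hsC := hs
          simp [pvIsJs] at hsC
          simp [ht', hn, hnC.1, hnC.2, hs, hsC.1, hsC.2, ih]
    · by_cases hw : PySem.Str.lower (pvGet l "type") == "warning"
      · simp [ht, hw, ih]
      · simp [ht, hw, ih]

-- ===== VERDICT (by name: the statement is the Claim_ definition above) =====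
theorem analyze_console_errors_spec : Claim_equal_analyze_console_errors := by
  intro logs _
  show analyze_console_errors logs = analyze_console_errors_alt logs
  unfold analyze_console_errors analyze_console_errors_alt
  rw [pvFoldA_eq]
  simp only [List.nil_append]
  split_ifs <;> simp_all
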